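-- pv_equiv track=rewrite | github.com/julia-b-grenier/python_practice | MidtermReview/remove_snow.py | remove_snow
-- ===== SOURCE A (Python) =====
-- def remove_snow(s):
--
--     if "\'" in s:
--         raise ValueError("There is rain in the string")
--
--     no_snow = ""
--
--     count_snow = 0
--     for i in range(len(s)):
--
--         if s[i] in "*." and i != 0:
--             if s[i-1] not in "*.":
--                 count_snow = 0
--
--         if s[i] in "*.":
--             count_snow += 1
--         elif count_snow > 0:
--             count_snow -= 1
--         else:
--             no_snow += s[i]
--
--     return no_snow
-- ===== SOURCE B (Python) =====
-- def remove_snow(s):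
--     if "'" in s:
--         raise ValueError("There is rain in the string")
--     parts = []
--     budget = 0
--     i, n = 0, len(s)
--     while i < n:
--         is_snow = s[i] in "*."
--         j = i
--         while j < n and (s[j] in "*.") == is_snow:
--             j += 1
--         if is_snow:
--             budget = j - i
--         else:
--             parts.append(s[i + min(budget, j - i):j])
--         i = j
--     return "".join(parts)
-- ===== Notes on version B (the rewrite author's own statement) =====
-- stated objective: alternative
-- what changed: A scans character by character with a counter reset via an s[i-1] lookback; B splits the string into maximal snow/non-snow runs and processes each run as a block, overwriting an integer budget with each snow-run length and slicing the eaten prefix off each non-snow run.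
import Mathlib
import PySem

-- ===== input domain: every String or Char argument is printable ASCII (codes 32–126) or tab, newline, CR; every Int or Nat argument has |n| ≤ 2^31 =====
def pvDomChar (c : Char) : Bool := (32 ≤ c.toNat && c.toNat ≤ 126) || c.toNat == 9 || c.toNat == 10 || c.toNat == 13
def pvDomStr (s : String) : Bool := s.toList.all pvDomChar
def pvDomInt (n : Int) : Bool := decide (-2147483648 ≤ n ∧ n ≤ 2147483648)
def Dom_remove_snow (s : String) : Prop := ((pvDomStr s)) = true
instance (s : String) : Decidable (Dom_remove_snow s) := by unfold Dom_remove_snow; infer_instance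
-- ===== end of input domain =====

-- B rewrites A's char-by-char loop as a segment walk (maximal snow/non-snow runs with a
-- run-length budget); objective: alternative decomposition, same O(n) cost. Both raise on "'".

-- shared helper: membership in the snow alphabet "*."
def isSnow (c : Char) : Bool := c == '*' || c == '.'

-- ===== PORT A =====
-- loop body of A's `for i in range(len(s))`
def snowStep (cs : List Char) (st : Int × List Char) (i : Nat) : Int × List Char :=
  let c := cs.getD i ' '
  let cnt1 := if isSnow c && i != 0 then
      (if isSnow (cs.getD (i - 1) ' ') = false then (0 : Int) else st.1)
    else st.1
  if isSnow c then (cnt1 + 1, st.2)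
  else if cnt1 > 0 then (cnt1 - 1, st.2)
  else (cnt1, st.2 ++ [c])

def remove_snow (s : String) : String :=
  let cs := s.toList
  String.mk (((List.range cs.length).foldl (snowStep cs) ((0 : Int), ([] : List Char))).2)

-- ===== PORT B =====
-- B's outer while loop: take the maximal run of equal snow-ness, process it as a block
def segsB : List Char → Int → List Char
  | [], _ => []
  | c :: t, b =>
    let run := (c :: t).takeWhile (fun x => isSnow x == isSnow c)
    let rest := (c :: t).dropWhile (fun x => isSnow x == isSnow c)
    if isSnow c then segsB rest (run.length : Int)
    else run.drop (min b (run.length : Int)).toNat ++ segsB rest b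
termination_by cs _ => cs.length
decreasing_by
  all_goals
    rw [List.dropWhile_cons_of_pos (by simp)]
    exact Nat.lt_succ_of_le (List.length_dropWhile_le _ _)

def remove_snow_alt (s : String) : String :=
  String.mk (segsB s.toList 0)

-- ===== PRECONDITION & SPEC =====
-- Pre_ excludes exactly the strings containing an apostrophe, on which A (and B) raise ValueError.
def Pre_remove_snow (s : String) : Prop := '\'' ∉ s.toList
instance (s : String) : Decidable (Pre_remove_snow s) := by unfold Pre_remove_snow; infer_instance
def pvWitness_remove_snow : String := "ab*..cd ef"

def Spec_remove_snow (s : String) (out : String) : Prop := out = remove_snow_alt s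
instance (s : String) (out : String) : Decidable (Spec_remove_snow s out) := by unfold Spec_remove_snow; infer_instance

-- ===== CLAIM (what is proved, stated in full; the proofs are below) =====
def Claim_equal_remove_snow : Prop := ∀ (s : String), Dom_remove_snow s → Pre_remove_snow s → Spec_remove_snow s (remove_snow s)

-- ===== LEMMAS AND PROOFS =====

-- proof-side recursive rendering of A's loop: prev char (none at i = 0) and the counter
def auxA : List Char → Option Char → Int → List Char
  | [], _, _ => []
  | c :: t, prev, cnt =>
    let cnt1 := match prev with
      | none => cnt
      | some p => if isSnow c && !(isSnow p) then 0 else cnt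
    if isSnow c then auxA t (some c) (cnt1 + 1)
    else if cnt1 > 0 then auxA t (some c) (cnt1 - 1)
    else c :: auxA t (some c) cnt1

lemma foldA (cs : List Char) : ∀ (t : List Char) (k : Nat) (cnt : Int) (acc : List Char),
    cs.drop k = t →
    ((List.range' k t.length).foldl (snowStep cs) (cnt, acc)).2
      = acc ++ auxA t (if k = 0 then none else some (cs.getD (k - 1) ' ')) cnt := by
  intro t
  induction t with
  | nil => intro k cnt acc _; simp [auxA]
  | cons c t' ih =>
    intro k cnt acc h
    have hk : k < cs.length := by
      by_contra hk
      simp [List.drop_eq_nil_of_le (Nat.le_of_not_lt hk)] at h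
    have hget : cs.getD k ' ' = c := by
      have : cs[k]? = some c := by
        have h0 : (cs.drop k)[0]? = some c := by rw [h]; rfl
        rwa [List.getElem?_drop, Nat.add_zero] at h0
      simp [List.getD_eq_getElem?_getD, this]
    have hdrop : cs.drop (k + 1) = t' := by
      have h2 := congrArg (List.drop 1) h
      simpa [List.drop_drop, Nat.add_comm] using h2
    rw [List.length_cons, List.range'_succ, List.foldl_cons]
    have ihk := fun cnt' acc' => ih (k + 1) cnt' acc' hdrop
    simp only [Nat.add_sub_cancel, hget, reduceIte, Nat.succ_ne_zero] at ihk
    show ((List.range' (k + 1) t'.length).foldl (snowStep cs) (snowStep cs (cnt, acc) k)).2 = _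
    rcases Nat.eq_zero_or_pos k with hk0 | hk0
    · subst hk0
      simp only [snowStep, hget, auxA]
      by_cases hc : isSnow c
      · simp only [hc, Bool.true_and, bne_self_eq_false, Bool.false_eq_true, not_false_iff]
        simp [hc, ihk]
      · simp only [hc, Bool.false_and, if_false, Bool.false_eq_true]
        by_cases hpos : cnt > 0
        · simp [hc, hpos, ihk]
        · simp [hc, hpos, ihk, List.append_assoc]
    · have hkne : k ≠ 0 := Nat.pos_iff_ne_zero.mp hk0
      simp only [if_neg hkne, snowStep, hget, auxA]
      have hbne : (k != 0) = true := by simp [hkne]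
      by_cases hc : isSnow c
      · by_cases hp : isSnow (cs.getD (k - 1) ' ')
        · simp [hc, hp, hbne, ihk]
        · simp [hc, hp, hbne, ihk]
      · simp only [hc, Bool.false_and, if_false, Bool.false_eq_true]
        by_cases hpos : cnt > 0
        · simp [hc, hpos, ihk]
        · simp [hc, hpos, ihk, List.append_assoc]

lemma remove_snow_eq_auxA (s : String) :
    remove_snow s = String.mk (auxA s.toList none 0) := by
  have h := foldA s.toList s.toList 0 0 [] rfl
  rw [if_pos rfl, List.nil_append] at h
  show String.mk ((List.range s.toList.length).foldl (snowStep s.toList) (0, [])).2 = _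
  rw [List.range_eq_range', h]

-- prev is irrelevant when the head is not snow
lemma auxA_prev_any (cs : List Char) (p q : Char) (cnt : Int)
    (h : ∀ y, cs.head? = some y → isSnow y = false) :
    auxA cs (some p) cnt = auxA cs (some q) cnt := by
  cases cs with
  | nil => rfl
  | cons c t => simp [auxA, h c rfl]

-- only the snow-ness of prev matters
lemma auxA_prev_congr (cs : List Char) (p q : Char) (cnt : Int) (h : isSnow p = isSnow q) :
    auxA cs (some p) cnt = auxA cs (some q) cnt := by
  cases cs with
  | nil => rfl
  | cons c t => simp [auxA, h]

-- at a fresh snow run after a non-snow prev, the incoming counter is discarded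
lemma auxA_reset (cs : List Char) (p : Char) (a b : Int) (hp : isSnow p = false)
    (h : cs = [] ∨ ∃ c t, cs = c :: t ∧ isSnow c = true) :
    auxA cs (some p) a = auxA cs (some p) b := by
  rcases h with rfl | ⟨c, t, rfl, hc⟩
  · rfl
  · simp [auxA, hc, hp]

-- a run of snow chars just accumulates the counter
lemma auxA_snow (run : List Char) : ∀ (t : List Char) (p : Char) (cnt : Int),
    (∀ x ∈ run, isSnow x = true) → isSnow p = true →
    (∀ y, t.head? = some y → isSnow y = false) →
    auxA (run ++ t) (some p) cnt = auxA t (some p) (cnt + run.length) := by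
  induction run with
  | nil => intro t p cnt _ _ _; simp
  | cons c run' ih =>
    intro t p cnt hall hp ht
    have hc : isSnow c = true := hall c (List.mem_cons_self ..)
    have : auxA ((c :: run') ++ t) (some p) cnt = auxA (run' ++ t) (some c) (cnt + 1) := by
      simp [auxA, hc, hp]
    rw [this, ih t c (cnt + 1) (fun x hx => hall x (List.mem_cons_of_mem _ hx)) hc ht]
    rcases ht' : t with _ | ⟨y, t''⟩
    · simp [auxA]
    · rw [auxA_prev_any _ c p _ (by rintro z hz; cases hz; exact ht y (by rw [ht']; rfl)),
        auxA_prev_any _ p p _ (by rintro z hz; cases hz; exact ht y (by rw [ht']; rfl))]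
      congr 1
      push_cast [List.length_cons]
      ring

-- a run of non-snow chars: the first `cnt` are eaten, the rest are kept
lemma auxA_nonsnow (run : List Char) : ∀ (t : List Char) (p : Char) (k : Int),
    0 ≤ k → (∀ x ∈ run, isSnow x = false) → isSnow p = false →
    ∃ m : Int, auxA (run ++ t) (some p) k = run.drop k.toNat ++ auxA t (some p) m := by
  induction run with
  | nil => intro t p k _ _ _; exact ⟨k, by simp⟩
  | cons c run' ih =>
    intro t p k hk hall hp
    have hc : isSnow c = false := hall c (List.mem_cons_self ..)
    have hall' := fun x hx => hall x (List.mem_cons_of_mem _ hx)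
    by_cases hpos : k > 0
    · obtain ⟨m, hm⟩ := ih t c (k - 1) (by omega) hall' hc
      refine ⟨m, ?_⟩
      have : auxA ((c :: run') ++ t) (some p) k = auxA (run' ++ t) (some c) (k - 1) := by
        simp [auxA, hc, hpos]
      rw [this, hm, auxA_prev_congr t c p m (hc.trans hp.symm)]
      have hnat : k.toNat = (k - 1).toNat + 1 := by omega
      rw [hnat, List.drop_succ_cons]
    · have hk0 : k = 0 := by omega
      subst hk0
      obtain ⟨m, hm⟩ := ih t c 0 le_rfl hall' hc
      refine ⟨m, ?_⟩
      have : auxA ((c :: run') ++ t) (some p) 0 = c :: auxA (run' ++ t) (some c) 0 := by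
        simp [auxA, hc]
      rw [this, hm, auxA_prev_congr t c p m (hc.trans hp.symm)]
      simp

lemma drop_min (run : List Char) (a : Nat) :
    run.drop a = run.drop (min a run.length) := by
  rcases Nat.le_total a run.length with h | h
  · rw [Nat.min_eq_left h]
  · rw [Nat.min_eq_right h, List.drop_eq_nil_of_le h, List.drop_length]

-- segsB discards the incoming budget on a snow-headed list
lemma segsB_snow_head (y : Char) (t : List Char) (a b : Int) (hy : isSnow y = true) :
    segsB (y :: t) a = segsB (y :: t) b := by
  rw [segsB, segsB]
  simp [hy]

lemma auxA_eq_segsB (cs : List Char) : ∀ (p : Char) (k : Nat), isSnow p = false →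
    auxA cs (some p) (k : Int) = segsB cs (k : Int) := by
  induction hn : cs.length using Nat.strong_induction_on generalizing cs with
  | _ n ihn =>
  subst hn
  intro p k hp
  cases hcs : cs with
  | nil => simp [auxA, segsB]
  | cons c t =>
  subst hcs
  set pr := fun x => isSnow x == isSnow c with hpr
  have hsplit : (c :: t).takeWhile pr ++ (c :: t).dropWhile pr = c :: t :=
    List.takeWhile_append_dropWhile
  set run := (c :: t).takeWhile pr with hrun
  set rest := (c :: t).dropWhile pr with hrest
  have hrunall : ∀ x ∈ run, isSnow x = isSnow c := by
    intro x hx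
    have := List.mem_takeWhile_imp hx
    simpa [hpr] using this
  have hresthead : ∀ y, rest.head? = some y → isSnow y ≠ isSnow c := by
    intro y hy
    have := List.head?_dropWhile_not pr (c :: t)
    rw [← hrest, hy] at this
    simpa [hpr] using this
  have hrestlen : rest.length < (c :: t).length := by
    rw [hrest, hpr, List.dropWhile_cons_of_pos (by simp)]
    exact Nat.lt_succ_of_le (List.length_dropWhile_le _ _)
  have hrunne : run = c :: t.takeWhile pr := by
    rw [hrun, List.takeWhile_cons_of_pos (by simp [hpr])]
  by_cases hc : isSnow c
  -- snow run: counter reset, then accumulates to run.length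
  · have hstep : auxA (c :: t) (some p) (k : Int) = auxA (t.takeWhile pr ++ rest) (some c) 1 := by
      conv_lhs => rw [← hsplit, hrunne]
      simp [auxA, hc, hp]
    have hsnowall : ∀ x ∈ t.takeWhile pr, isSnow x = true := by
      intro x hx
      exact (hrunall x (by rw [hrunne]; exact List.mem_cons_of_mem _ hx)).trans hc
    have hrh : ∀ y, rest.head? = some y → isSnow y = false := by
      intro y hy
      have := hresthead y hy
      simp [hc] at this
      exact this
    rw [hstep, auxA_snow _ rest c 1 hsnowall hc hrh]
    have hlen : (1 : Int) + (t.takeWhile pr).length = (run.length : Int) := by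
      rw [hrunne]; push_cast [List.length_cons]; ring
    rw [hlen]
    have hright : segsB (c :: t) (k : Int) = segsB rest (run.length : Int) := by
      conv_lhs => rw [segsB]
      simp only [← hpr, ← hrun, ← hrest, if_pos hc]
    rw [hright, auxA_prev_any rest c p _ hrh]
    exact ihn rest.length (by simpa using hrestlen) rest rfl p run.length hp
  -- non-snow run: drop min(budget, len) chars, keep the rest
  · have hnsall : ∀ x ∈ run, isSnow x = false := by
      intro x hx; rw [hrunall x hx]; simp [hc]
    have hstep : auxA (c :: t) (some p) (k : Int) = auxA (run ++ rest) (some p) (k : Int) := by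
      rw [hsplit]
    obtain ⟨m, hm⟩ := auxA_nonsnow run rest p (k : Int) (by positivity) hnsall hp
    rw [hstep, hm]
    have hright : segsB (c :: t) (k : Int) =
        run.drop (min (k : Int) (run.length : Int)).toNat ++ segsB rest (k : Int) := by
      conv_lhs => rw [segsB]
      simp only [← hpr, ← hrun, ← hrest, if_neg hc]
    rw [hright]
    have hdropeq : run.drop ((k : Int)).toNat = run.drop (min (k : Int) (run.length : Int)).toNat := by
      have h1 : ((k : Int)).toNat = k := Int.toNat_natCast k
      have h2 : (min (k : Int) (run.length : Int)).toNat = min k run.length := by omega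
      rw [h1, h2]
      exact drop_min run k
    rw [hdropeq]
    congr 1
    cases hr : rest with
    | nil => simp [auxA, segsB]
    | cons y t'' =>
      rw [hr] at hrestlen
      have hy : isSnow y = true := by
        have := hresthead y (by rw [hr]; rfl)
        simpa [hc] using this
      rw [auxA_reset (y :: t'') p m ((0 : Nat) : Int) hp (Or.inr ⟨y, t'', rfl, hy⟩),
        ihn (y :: t'').length (by simpa using hrestlen) (y :: t'') rfl p 0 hp]
      -- segsB ignores the incoming budget when the list starts with a snow char
      rw [segsB_snow_head y t'' _ _ hy]

theorem remove_snow_spec : Claim_equal_remove_snow := by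
  intro s _ _
  unfold Spec_remove_snow remove_snow_alt
  rw [remove_snow_eq_auxA]
  congr 1
  have h0 : auxA s.toList none 0 = auxA s.toList (some ',') 0 := by
    cases h : s.toList with
    | nil => rfl
    | cons c t => simp [auxA]
  rw [h0]
  exact auxA_eq_segsB s.toList ',' 0 (by decide)
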